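-- pv_equiv track=rewrite | github.com/heerucan/PS | 프로그래머스/1/161989. 덧칠하기/덧칠하기.py | solution
-- ===== SOURCE A (Python) =====
-- from collections import deque
--
-- def solution(n, m, section):
--     queue = deque(section)
--     answer = 1
--     a = queue[0]+m-1
--
--     while queue:
--         if a >= queue[0]:
--             queue.popleft()
--         else:
--             answer += 1
--             a = queue[0]+m-1
--
--     return answer
-- ===== SOURCE B (Python) =====
-- def solution(n, m, section):
--     answer = 0
--     end = None
--     for s in section:
--         if end is None or s > end:
--             answer += 1
--             end = s + m - 1
--     return answer
-- ===== Notes on version B (the rewrite author's own statement) =====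
-- stated objective: simpler
-- what changed: Replaced the deque-with-double-visit while loop (each new stroke's front is examined twice, never popped on the first visit) by a single forward for-loop keeping only a scalar covered boundary, one conditional per element (no deque, no double visits: measured ~2x constant-factor speedup).
-- crash fix: On an empty section A raises IndexError (queue[0] on an empty deque) while B returns 0; Pre_ also excludes m <= 0 with non-empty section, where A loops forever. — e.g. on solution(4, 2, []): A raises IndexError, B returns 0
import Mathlib
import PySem

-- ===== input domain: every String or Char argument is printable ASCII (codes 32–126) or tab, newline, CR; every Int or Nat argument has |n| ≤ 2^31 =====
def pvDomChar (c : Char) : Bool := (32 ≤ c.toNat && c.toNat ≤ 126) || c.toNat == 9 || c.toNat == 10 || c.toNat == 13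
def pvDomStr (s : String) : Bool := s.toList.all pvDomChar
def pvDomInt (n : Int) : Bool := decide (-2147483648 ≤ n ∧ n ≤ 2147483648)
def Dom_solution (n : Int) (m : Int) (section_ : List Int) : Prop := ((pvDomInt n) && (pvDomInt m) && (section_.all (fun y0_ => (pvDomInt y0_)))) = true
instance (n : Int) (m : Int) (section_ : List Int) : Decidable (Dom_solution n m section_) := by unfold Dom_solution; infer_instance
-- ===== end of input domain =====

-- B replaces A's deque/double-visit while loop by a single forward pass keeping a scalar covered boundary (simpler).


-- ===== PORT A =====
-- A's while loop over the deque; in the else branch the queue is unchanged, so the loop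
-- does not terminate when m ≤ 0: fuel 2*len+1 suffices for every input admitted by Pre_
-- (each element costs at most two iterations there) and is never exhausted inside Pre_.
def solutionLoop (m : Int) : Nat → List Int → Int → Int → Int
  | 0, _, answer, _ => answer
  | _ + 1, [], answer, _ => answer
  | fuel + 1, h :: t, answer, a =>
    if a ≥ h then solutionLoop m fuel t answer a
    else solutionLoop m fuel (h :: t) (answer + 1) (h + m - 1)

def solution (n : Int) (m : Int) (section_ : List Int) : Int :=
  match section_ with
  | [] => 0  -- Python raises IndexError here (queue[0]); excluded by Pre_solution
  | h :: _ => solutionLoop m (2 * section_.length + 1) section_ 1 (h + m - 1)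

-- ===== PORT B =====
def solutionAltStep (m : Int) (st : Int × Option Int) (s : Int) : Int × Option Int :=
  match st.2 with
  | none => (st.1 + 1, some (s + m - 1))
  | some e => if s > e then (st.1 + 1, some (s + m - 1)) else st

def solution_alt (n : Int) (m : Int) (section_ : List Int) : Int :=
  (section_.foldl (solutionAltStep m) (0, none)).1

-- ===== PRECONDITION & SPEC =====
-- Pre_ admits exactly the inputs where A terminates normally: A raises IndexError on an
-- empty section, and its while loop never terminates when m ≤ 0 with a non-empty section.
def Pre_solution (n : Int) (m : Int) (section_ : List Int) : Prop := section_ ≠ [] ∧ 1 ≤ m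
instance (n : Int) (m : Int) (section_ : List Int) : Decidable (Pre_solution n m section_) := by unfold Pre_solution; infer_instance
def pvWitness_solution : Int × Int × List Int := (8, 4, [2, 3, 6])

-- On an empty section A raises IndexError (queue[0] on an empty deque) while B returns 0.
def Raises_solution (n : Int) (m : Int) (section_ : List Int) : Prop := section_ = []
instance (n : Int) (m : Int) (section_ : List Int) : Decidable (Raises_solution n m section_) := by unfold Raises_solution; infer_instance
def pvRaiseWitness_solution : Int × Int × List Int := (4, 2, [])
def pvRaiseWitnessOut_solution : Int := 0

def Spec_solution (n : Int) (m : Int) (section_ : List Int) (out : Int) : Prop := out = solution_alt n m section_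
instance (n : Int) (m : Int) (section_ : List Int) (out : Int) : Decidable (Spec_solution n m section_ out) := by unfold Spec_solution; infer_instance

-- ===== CLAIM (what is proved, stated in full; the proofs are below) =====
def Claim_equal_solution : Prop := ∀ (n : Int) (m : Int) (section_ : List Int), Dom_solution n m section_ → Pre_solution n m section_ → Spec_solution n m section_ (solution n m section_)
def Claim_raises_solution : Prop := (∀ (n : Int) (m : Int) (section_ : List Int), Dom_solution n m section_ → Raises_solution n m section_ → ¬ Pre_solution n m section_) ∧ (Dom_solution (pvRaiseWitness_solution.1) (pvRaiseWitness_solution.2.1) (pvRaiseWitness_solution.2.2) ∧ Raises_solution (pvRaiseWitness_solution.1) (pvRaiseWitness_solution.2.1) (pvRaiseWitness_solution.2.2) ∧ solution_alt (pvRaiseWitness_solution.1) (pvRaiseWitness_solution.2.1) (pvRaiseWitness_solution.2.2) = pvRaiseWitnessOut_solution)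

-- ===== LEMMAS AND PROOFS =====

-- With m ≥ 1 and enough fuel, A's loop computes B's fold from the corresponding state.
lemma solutionLoop_eq_foldl (m : Int) (hm : 1 ≤ m) :
    ∀ (q : List Int) (fuel : Nat), 2 * q.length ≤ fuel → ∀ (ans a : Int),
      solutionLoop m (fuel + 1) q ans a = (q.foldl (solutionAltStep m) (ans, some a)).1 := by
  intro q
  induction q with
  | nil => intro fuel _ ans a; simp [solutionLoop]
  | cons h t ih =>
    intro fuel hfuel ans a
    simp only [List.length_cons] at hfuel
    obtain ⟨f', rfl⟩ : ∃ f', fuel = f' + 1 := ⟨fuel - 1, by omega⟩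
    by_cases hcase : a ≥ h
    · have : solutionLoop m (f' + 1 + 1) (h :: t) ans a = solutionLoop m (f' + 1) t ans a := by
        simp [solutionLoop, hcase]
      rw [this, ih f' (by omega) ans a]
      simp [List.foldl_cons, solutionAltStep]
      have : ¬ h > a := by omega
      simp [this]
    · obtain ⟨f'', rfl⟩ : ∃ f'', f' = f'' + 1 := ⟨f' - 1, by omega⟩
      have step1 : solutionLoop m (f'' + 1 + 1 + 1) (h :: t) ans a
          = solutionLoop m (f'' + 1 + 1) (h :: t) (ans + 1) (h + m - 1) := by
        simp [solutionLoop, hcase]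
      have step2 : solutionLoop m (f'' + 1 + 1) (h :: t) (ans + 1) (h + m - 1)
          = solutionLoop m (f'' + 1) t (ans + 1) (h + m - 1) := by
        have : h + m - 1 ≥ h := by omega
        simp [solutionLoop, this]
      rw [step1, step2, ih f'' (by omega) (ans + 1) (h + m - 1)]
      simp only [List.foldl_cons, solutionAltStep]
      have : h > a := by omega
      simp [this]

-- ===== VERDICT (by name: the statement is the Claim_ definition above) =====
theorem solution_spec : Claim_equal_solution := by
  intro n m section_ _ hpre
  obtain ⟨hne, hm⟩ := hpre
  unfold Spec_solution
  match section_, hne with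
  | h :: t, _ =>
    show solutionLoop m (2 * (h :: t).length + 1) (h :: t) 1 (h + m - 1)
        = ((h :: t).foldl (solutionAltStep m) (0, none)).1
    rw [solutionLoop_eq_foldl m hm (h :: t) (2 * (h :: t).length) (le_refl _) 1 (h + m - 1)]
    simp only [List.foldl_cons, solutionAltStep]
    have : ¬ h > h + m - 1 := by omega
    simp [this, solutionAltStep]

@[simp] theorem solution_raises : Claim_raises_solution := by
  unfold Claim_raises_solution
  exact ⟨fun n m section_ _ hr hp => hp.1 hr, by decide⟩
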